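-- pv_equiv track=rewrite | github.com/nickchen111/Leetcode | Daily/3954-maximum-balanced-shipments/maximum-balanced-shipments.py | maxBalancedShipments
-- ===== SOURCE A (Python) =====
-- from typing import List
--
-- def maxBalancedShipments(nums: List[int]) -> int:
--     '''
--     求有多少個遞減段
--     4 5 4 5 4 5 4
--     '''
--     n = len(nums)
--     i = 1
--     ans = 0
--     while i < n:
--         if nums[i] < nums[i - 1]:
--             ans += 1
--             i += 2
--             continue
--         i += 1
--     return ans
--
--     '''
--     i = ans = 0
--     while i < n:
--         j = i + 1
--         while j < n and nums[j] >= nums[j - 1]: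
--             j += 1
--         if j < n: ans += 1
--         i = j + 1
--     return ans
--     '''
-- ===== SOURCE B (Python) =====
-- from typing import List
--
-- def maxBalancedShipments(nums: List[int]) -> int:
--     # Staged approach: first collect all strict-descent positions, then greedily
--     # count them skipping a descent that is immediately adjacent to the last counted one.
--     drops = [i for i in range(1, len(nums)) if nums[i] < nums[i - 1]]
--     ans = 0
--     last = -2
--     for d in drops:
--         if d != last + 1:
--             ans += 1
--             last = d
--     return ans
-- ===== Notes on version B (the rewrite author's own statement) =====
-- stated objective: alternative
-- what changed: Replaced A's single index-jumping scan of the array with a two-stage computation: a first pass materialises the list of all strict-descent positions, and a second pass greedily counts those positions, skipping a descent adjacent to the last counted one.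
import Mathlib
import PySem

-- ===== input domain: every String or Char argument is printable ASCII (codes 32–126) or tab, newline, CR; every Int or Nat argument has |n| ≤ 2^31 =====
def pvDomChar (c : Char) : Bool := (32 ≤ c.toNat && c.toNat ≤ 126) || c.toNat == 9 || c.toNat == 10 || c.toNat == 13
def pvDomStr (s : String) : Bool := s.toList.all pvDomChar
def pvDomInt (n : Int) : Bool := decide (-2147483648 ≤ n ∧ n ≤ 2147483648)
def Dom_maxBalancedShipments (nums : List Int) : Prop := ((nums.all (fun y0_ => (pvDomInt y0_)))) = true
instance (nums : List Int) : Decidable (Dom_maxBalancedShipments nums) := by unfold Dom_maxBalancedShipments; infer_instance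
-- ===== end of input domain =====

-- B replaces A's index-jumping single scan with a two-stage computation (collect all descent
-- positions, then greedily count them skipping adjacency); same cost, return values proved equal.

-- ===== PORT A =====
-- A's while-loop over compare-index i, ported with an always-sufficient Nat fuel (totality
-- guard only). Indices i and i-1 are always in range (1 ≤ i < n), so pyGetD's default 0 is
-- never used.
def loopA (nums : List Int) (n : Int) (fuel : Nat) (i ans : Int) : Int :=
  match fuel with
  | 0 => ans
  | Nat.succ f =>
    if i < n then
      if PySem.List.pyGetD nums i 0 < PySem.List.pyGetD nums (i - 1) 0 then
        loopA nums n f (i + 2) (ans + 1)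
      else
        loopA nums n f (i + 1) ans
    else ans

def maxBalancedShipments (nums : List Int) : Int :=
  loopA nums (nums.length : Int) nums.length 1 0

-- ===== PORT B =====
-- step of the second-pass for-loop over the descent positions, state = (ans, last)
def stepB (st : Int × Int) (d : Int) : Int × Int :=
  if d ≠ st.2 + 1 then (st.1 + 1, d) else st

def maxBalancedShipments_alt (nums : List Int) : Int :=
  let drops := (PySem.List.pyRange 1 (nums.length : Int) 1).filter
    (fun i => decide (PySem.List.pyGetD nums i 0 < PySem.List.pyGetD nums (i - 1) 0))
  (drops.foldl stepB (0, -2)).1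

-- ===== PRECONDITION & SPEC =====
def Spec_maxBalancedShipments (nums : List Int) (out : Int) : Prop := out = maxBalancedShipments_alt nums
instance (nums : List Int) (out : Int) : Decidable (Spec_maxBalancedShipments nums out) := by unfold Spec_maxBalancedShipments; infer_instance

-- ===== CLAIM (what is proved, stated in full; the proofs are below) =====
def Claim_equal_maxBalancedShipments : Prop := ∀ (nums : List Int), Dom_maxBalancedShipments nums → Spec_maxBalancedShipments nums (maxBalancedShipments nums)

-- ===== LEMMAS AND PROOFS =====

-- the descent positions from index i onward (B's drops list is dropsFrom 1)
def dropsFrom (nums : List Int) (n i : Int) : List Int :=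
  (PySem.List.pyRange i n 1).filter
    (fun j => decide (PySem.List.pyGetD nums j 0 < PySem.List.pyGetD nums (j - 1) 0))

theorem loopA_stop (nums : List Int) (n : Int) (f : Nat) (i ans : Int) (h : ¬ i < n) :
    loopA nums n f i ans = ans := by
  cases f <;> simp [loopA, h]

theorem dropsFrom_nil (nums : List Int) (n i : Int) (h : n ≤ i) :
    dropsFrom nums n i = [] := by
  simp [dropsFrom, PySem.List.pyRange_one_eq_nil h]

theorem dropsFrom_cons (nums : List Int) (n i : Int) (h : i < n) :
    dropsFrom nums n i =
      (if PySem.List.pyGetD nums i 0 < PySem.List.pyGetD nums (i - 1) 0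
        then [i] else []) ++ dropsFrom nums n (i + 1) := by
  rw [dropsFrom, PySem.List.pyRange_one_cons h, List.filter_cons]
  split_ifs with hp hq hq <;> simp_all [dropsFrom]

-- after counting a descent at i (state last = i), the possible adjacent descent at i+1 is
-- skipped by stepB without changing the state: folding from i+1 equals folding from i+2
theorem fold_skip (nums : List Int) (n i ans : Int) (h : i + 1 < n ∨ n ≤ i + 1) :
    ((dropsFrom nums n (i + 1)).foldl stepB (ans, i)).1 =
      ((dropsFrom nums n (i + 2)).foldl stepB (ans, i)).1 := by
  rcases h with h | h
  · rw [dropsFrom_cons nums n (i + 1) h, show i + 1 + 1 = i + 2 from by ring]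
    split_ifs with hp
    · simp [stepB]
    · simp
  · rw [dropsFrom_nil nums n (i + 1) h, dropsFrom_nil nums n (i + 2) (by omega)]

-- main invariant: A's loop from compare-index i equals the greedy fold over the remaining
-- descent positions, for any state last ≤ i - 2 (so the head of dropsFrom i is never skipped)
theorem loopA_eq_fold (nums : List Int) (n : Int) :
    ∀ (k f : Nat) (i ans last : Int), last ≤ i - 2 → (n - i).toNat ≤ k → (n - i).toNat ≤ f →
      loopA nums n f i ans = ((dropsFrom nums n i).foldl stepB (ans, last)).1 := by
  intro k
  induction k with
  | zero =>
    intro f i ans last hlast hk hf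
    have hi : ¬ i < n := by omega
    rw [loopA_stop nums n f i ans hi, dropsFrom_nil nums n i (by omega)]
    simp
  | succ k ih =>
    intro f i ans last hlast hk hf
    by_cases hi : i < n
    · cases f with
      | zero => omega
      | succ f =>
        rw [loopA, dropsFrom_cons nums n i hi]
        simp only [hi, if_true]
        by_cases hp : PySem.List.pyGetD nums i 0 < PySem.List.pyGetD nums (i - 1) 0
        · simp only [hp, if_true, List.singleton_append, List.foldl_cons]
          have hstep : stepB (ans, last) i = (ans + 1, i) := by
            simp [stepB]; omega
          rw [hstep, fold_skip nums n i (ans + 1) (by omega)]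
          exact ih f (i + 2) (ans + 1) i (by omega) (by omega) (by omega)
        · simp only [hp, if_false, List.nil_append]
          exact ih f (i + 1) ans last (by omega) (by omega) (by omega)
    · rw [loopA_stop nums n _ i ans hi, dropsFrom_nil nums n i (by omega)]
      simp

-- ===== VERDICT (by name: the statement is the Claim_ definition above) =====
theorem maxBalancedShipments_spec : Claim_equal_maxBalancedShipments := by
  intro nums _
  unfold Spec_maxBalancedShipments maxBalancedShipments maxBalancedShipments_alt
  exact loopA_eq_fold nums (nums.length : Int) nums.length nums.length 1 0 (-2)
    (by omega) (by omega) (by omega)
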